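/- GENERATED by tools/from_farm_form.py from farm/worked/weighted_sum/Proof.lean (a worked proof of the farm's unit `weighted_sum`,
   accepted by the verdict) — do not edit. -/
import Toy.Spec.Units.weighted_sum
open X86 X86.User Asan ProgX.Base

set_option maxRecDepth 4000
set_option maxHeartbeats 4000000

namespace Toy.Spec.Proved.weighted_sum
open Toy.Spec.weighted_sum (Statement)

/-- `cmp rbx, 0x3f ; jle` at 0x105270: the signed comparison of the counter `i ≤ 64` is the one of numbers. -/
theorem wsum_jle_small_w : ∀ i, i ≤ 64 →
    ((UInt64.ofNat i).toBitVec.toInt ≤ (63#64).toInt ↔ i ≤ 63) := by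
  decide

/-- `and r12d, 3` at 0x10524b: the index into `weights` is below 4. -/
theorem wsum_and3_small_w : ∀ i, i ≤ 64 →
    (Word.ofBV (Word.part Width.w32 (UInt64.ofNat i) &&& 3#32)).toNat < 4 := by
  decide

end Toy.Spec.Proved.weighted_sum

/-- `weighted_sum` satisfies its contract: five pushes, a loop with two checked byte loads (`buffer[i]` inside the 64 live bytes of
the pre, `weights[i & 3]` inside the global `weights`), the pops and the `ret`. -/
theorem Toy.Spec.Proved.weighted_sum_ok : Toy.Spec.weighted_sum.Statement := by
  intro Lay hLay μ hμ u₀ hcode hload1 others frames u ret he hpre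
  v_entry he
  obtain ⟨hsh, hlive, hweights⟩ := hpre
  -- where the buffer is: one arithmetic fact
  have hsp := hsh.rsp
  have hwhere : 0x140000 ≤ (u.reg .rdi).toNat ∧ (u.reg .rdi).toNat + 64 ≤ 0xC00000 ∧
        ((u.reg .rsp).toNat + 8 ≤ (u.reg .rdi).toNat ∨ (u.reg .rdi).toNat + 64 ≤ 0x700000 ∨
          0x800000 ≤ (u.reg .rdi).toNat) :=
    hlive.where_ hsh.inv hsh.offText (by omega)
  -- 0x105220 … 0x105236, toy.c:44-50: the pushes, `buffer` to r14, `i = 0`, `sum = 0`, the jump to the loop head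
  u_walk hcode [hμ.vendor] until [Toy.L.weighted_sum.loop1] span [ProgX.Base.L.textLo, ProgX.Base.L.textHi] side (v_side)
  -- 0x105270, toy.c:50: the loop head
  obtain ⟨i, hi, hile⟩ : ∃ i : Nat, s_105236.reg .rbx = UInt64.ofNat i ∧ i ≤ 64 :=
    ⟨0, w_rbx, Nat.zero_le _⟩
  have hsame : Mem.SameExcept [⟨(u.reg .rsp).toNat - 64, (u.reg .rsp).toNat⟩] u.mem s_105236.mem := by
    u_same
  have hun : ShadowUntouched u.mem s_105236.mem := by v_untouched
  have hs1 : UInt64.ofNat (s_105236.mem.readLE (u.reg .rsp - 8) 8) = u.reg .r14 := by u_resolve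
  have hs2 : UInt64.ofNat (s_105236.mem.readLE (u.reg .rsp - 16) 8) = u.reg .r13 := by u_resolve
  have hs3 : UInt64.ofNat (s_105236.mem.readLE (u.reg .rsp - 24) 8) = u.reg .r12 := by u_resolve
  have hs4 : UInt64.ofNat (s_105236.mem.readLE (u.reg .rsp - 32) 8) = u.reg .rbp := by u_resolve
  have hs5 : UInt64.ofNat (s_105236.mem.readLE (u.reg .rsp - 40) 8) = u.reg .rbx := by u_resolve
  have hs0 : UInt64.ofNat (s_105236.mem.readLE (u.reg .rsp) 8) = ret := by u_resolve
  have hdf : s_105236.flags .df = false := by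
    rw [w_flags]
    exact he_df
  replace w_kept := w_kept.mono_all (S' := [.rbx, .r13, .r14, .r12, .rsp, .rbp, .rdi, .rax, .rcx, .rdx]) (by rfl)
  clear w_mem w_flags w_rbx w_r13
  u_loop [i] (fun v => 64 - (v.reg .rbx).toNat)
  u_walk hcode [hμ.vendor] until [Toy.L.weighted_sum.loop1] span [ProgX.Base.L.textLo, ProgX.Base.L.textHi] side (v_side)
  · -- 0x10523f, toy.c:52: the check of the load `buffer[i]`: the byte is inside the 64 live bytes at `buffer`
    have hk : i ≤ 63 := (Toy.Spec.Proved.weighted_sum.wsum_jle_small_w i hile).mp hbr_105274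
    obtain ⟨hw1, hw2, hw3⟩ := hwhere
    have hun' : ShadowUntouched u.mem s_10523f.mem := by v_untouched
    exact hlive.accSmall hsh.inv hun' _ 1 (by decide) (by u_omega) (by u_omega)
  · -- 0x105257, toy.c:52: the check of the load `weights[i & 3]`: the byte is inside the global `weights` (4 bytes at 0x141200)
    have hj := Toy.Spec.Proved.weighted_sum.wsum_and3_small_w i hile
    have hbase : Toy.Globals.weights.obj.base = 0x141200 := rfl
    have hsize : Toy.Globals.weights.obj.size = 4 := rfl
    have hun' : ShadowUntouched u.mem s_105257.mem := by v_untouched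
    refine ProgX.Base.check_small_other hsh.inv hun' hweights (by decide) ?_ ?_
    · rw [hbase]
      u_omega
    · rw [hbase, hsize]
      u_omega
  · -- 0x10526c → 0x105270: the back edge
    have hk : i ≤ 63 := (Toy.Spec.Proved.weighted_sum.wsum_jle_small_w i hile).mp hbr_105274
    obtain ⟨hw1, hw2, hw3⟩ := hwhere
    u_loop_back [i + 1]
    · -- the counter
      rw [w_rbx, UInt64.ofNat_add]
      rfl
    · omega
    · -- still no store to the shadow (the two return addresses of the checks went to the stack)
      v_untouched
    · -- the direction flag: the second check kept it (`w_df_105257`), `imul` / `add` wrote status flags only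
      rw [w_flags]
      simp only [X86.User.df_setStatus]
      assumption
    · -- the measure: 64 - i
      rw [w_rbx]
      u_omega
  · -- 0x105276 … 0x105281, toy.c:54: the exit, walked to the `ret`
    refine ReachVia.done (Or.inl ?_)
    v_returned
    -- the post: no store went to the shadow
    show ShadowUntouched u.mem s_105281.mem
    rw [w_mem]
    exact hun
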